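-- pv_equiv track=rewrite | github.com/Matus-Dubrava/advent_of_code | in_python/rucksack_packing.py | get_rucksack_groups
-- ===== SOURCE A (Python) =====
-- from typing import List
--
-- def get_rucksack_groups(rucksacks: List[str]) -> List[List[str]]:
--     """
--     split rucksacks into gruops of 3
--     """
--
--     counter = 0
--     group = []
--     groups = []
--
--     for r in rucksacks:
--         counter += 1
--         group.append(r)
--
--         if counter == 3:
--             groups.append(group)
--             group = []
--             counter = 0
--
--     return groups
-- ===== SOURCE B (Python) =====
-- from typing import List
--
-- def get_rucksack_groups(rucksacks: List[str]) -> List[List[str]]: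
--     """
--     split rucksacks into groups of 3 (trailing partial group dropped)
--     """
--     n = len(rucksacks)
--     return [rucksacks[i:i+3] for i in range(0, n - n % 3, 3)]
-- ===== Notes on version B (the rewrite author's own statement) =====
-- stated objective: idiomatic
-- what changed: Replaces A's element-by-element loop with a running counter and mutable group buffer by a single comprehension over range(0, n - n%3, 3) that slices each complete triple directly.
import Mathlib
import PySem

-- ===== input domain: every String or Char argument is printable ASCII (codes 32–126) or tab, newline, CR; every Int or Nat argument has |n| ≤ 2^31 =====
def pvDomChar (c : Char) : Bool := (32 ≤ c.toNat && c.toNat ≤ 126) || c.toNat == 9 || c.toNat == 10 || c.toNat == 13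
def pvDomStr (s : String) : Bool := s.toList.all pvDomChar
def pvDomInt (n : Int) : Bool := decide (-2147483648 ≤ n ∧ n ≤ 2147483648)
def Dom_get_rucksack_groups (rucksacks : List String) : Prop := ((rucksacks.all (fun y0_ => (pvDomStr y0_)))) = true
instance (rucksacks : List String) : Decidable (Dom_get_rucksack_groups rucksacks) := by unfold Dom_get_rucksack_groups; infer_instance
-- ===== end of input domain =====

-- B replaces A's counter-and-buffer loop with a comprehension over range(0, n - n%3, 3)
-- slicing each complete triple directly (same O(n) cost; objective: idiomatic).

-- ===== PORT A =====
-- state = (counter, group, groups); literal transliteration of A's loop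
def get_rucksack_groups (rucksacks : List String) : List (List String) :=
  (rucksacks.foldl
    (fun (st : Int × List String × List (List String)) r =>
      let counter := st.1 + 1
      let group := st.2.1 ++ [r]
      if counter == 3 then (0, ([] : List String), st.2.2 ++ [group])
      else (counter, group, st.2.2))
    (0, [], [])).2.2

-- ===== PORT B =====
def get_rucksack_groups_alt (rucksacks : List String) : List (List String) :=
  let n : Int := rucksacks.length
  (PySem.List.pyRange 0 (n - PySem.Int.mod n 3) 3).map
    (fun i => PySem.List.slice rucksacks (some i) (some (i + 3)))

-- ===== PRECONDITION & SPEC =====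
def Spec_get_rucksack_groups (rucksacks : List String) (out : List (List String)) : Prop := out = get_rucksack_groups_alt rucksacks
instance (rucksacks : List String) (out : List (List String)) : Decidable (Spec_get_rucksack_groups rucksacks out) := by unfold Spec_get_rucksack_groups; infer_instance

-- ===== CLAIM (what is proved, stated in full; the proofs are below) =====
def Claim_equal_get_rucksack_groups : Prop := ∀ (rucksacks : List String), Dom_get_rucksack_groups rucksacks → Spec_get_rucksack_groups rucksacks (get_rucksack_groups rucksacks)

-- ===== LEMMAS AND PROOFS =====

-- reference chunking: consecutive complete triples, trailing partial dropped
def chunk3 : List String → List (List String)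
  | a :: b :: c :: rest => [a, b, c] :: chunk3 rest
  | _ => []

-- A's loop from counter 0, empty buffer, accumulated groups gs yields gs ++ chunk3 xs
lemma a_inv (xs : List String) (gs : List (List String)) :
    (xs.foldl
      (fun (st : Int × List String × List (List String)) r =>
        let counter := st.1 + 1
        let group := st.2.1 ++ [r]
        if counter == 3 then (0, ([] : List String), st.2.2 ++ [group])
        else (counter, group, st.2.2))
      (0, [], gs)).2.2 = gs ++ chunk3 xs := by
  induction xs using chunk3.induct generalizing gs with
  | case1 a b c rest ih =>
      simp only [List.foldl_cons]
      norm_num at ih ⊢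
      rw [ih]
      simp [chunk3]
  | case2 xs h =>
      cases xs with
      | nil => simp [chunk3]
      | cons a t =>
        cases t with
        | nil => norm_num [chunk3]
        | cons b t2 =>
          cases t2 with
          | nil => norm_num [chunk3]
          | cons c r => exact (h a b c r rfl).elim

-- B's strided range of slices, in Nat form
lemma b_eq (xs : List String) :
    get_rucksack_groups_alt xs
      = (List.range (xs.length / 3)).map (fun k => (xs.drop (3 * k)).take 3) := by
  show (PySem.List.pyRange 0 ((xs.length : Int) - PySem.Int.mod (xs.length : Int) 3) 3).map (fun i => PySem.List.slice xs (some i) (some (i + 3))) = _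
  have hm : PySem.Int.mod (xs.length : Int) 3 = ((xs.length % 3 : Nat) : Int) := by
    exact_mod_cast PySem.Int.mod_natCast xs.length 3
  rw [hm, PySem.List.pyRange_of_pos _ _ (by norm_num : (0:Int) < 3)]
  have hcount : (if (0:Int) < (xs.length : Int) - ((xs.length % 3 : Nat) : Int)
      then ((((xs.length : Int) - ((xs.length % 3 : Nat) : Int)) - 0 + 3 - 1) / 3).toNat else 0)
      = xs.length / 3 := by
    have h := Nat.div_add_mod xs.length 3
    have h2 : xs.length % 3 < 3 := Nat.mod_lt _ (by norm_num)
    split_ifs with h0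
    · omega
    · omega
  rw [hcount]
  rw [List.map_map]
  apply List.map_congr_left
  intro k hk
  simp only [Function.comp]
  have : (0:Int) + 3 * (k:Int) = ((3*k : Nat) : Int) := by push_cast; ring
  rw [this]
  have h2 : ((3*k : Nat) : Int) + 3 = ((3*k : Nat) : Int) + ((3:Nat) : Int) := by norm_num
  rw [h2, PySem.List.slice_natCast_add]

lemma chunk3_eq (xs : List String) :
    chunk3 xs = (List.range (xs.length / 3)).map (fun k => (xs.drop (3 * k)).take 3) := by
  induction xs using chunk3.induct with
  | case1 a b c rest ih =>
      have hl : (a :: b :: c :: rest).length / 3 = rest.length / 3 + 1 := by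
        simp [List.length_cons]; omega
      rw [chunk3, hl, List.range_succ_eq_map, List.map_cons, List.map_map]
      simp only [Nat.mul_zero, List.drop_zero, ih]
      congr 1
  | case2 xs h =>
      cases xs with
      | nil => simp [chunk3]
      | cons a t =>
        cases t with
        | nil => simp [chunk3]
        | cons b t2 =>
          cases t2 with
          | nil => simp [chunk3]
          | cons c r => exact (h a b c r rfl).elim

-- ===== VERDICT (by name: the statement is the Claim_ definition above) =====
theorem get_rucksack_groups_spec : Claim_equal_get_rucksack_groups := by
  intro xs _
  show get_rucksack_groups xs = get_rucksack_groups_alt xs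
  rw [b_eq, ← chunk3_eq]
  have h := a_inv xs []
  simp only [List.nil_append] at h
  unfold get_rucksack_groups
  norm_num at h ⊢
  exact h
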